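-- pv_equiv track=rewrite | github.com/cjc-github/JNFuzz-Droid | src/lib/JuCify/nativediscloser/get_dynamic_methods.py | select_abi_dir
-- ===== SOURCE A (Python) =====
-- ABI_DIRS = ['lib/armeabi-v7a/', 'lib/arm64-v8a/', 'lib/x86/', 'lib/x86_64/', 'lib/armeabi/', 'lib/mips/', 'lib/mips64/']
--
-- def select_abi_dir(dir_list):
--     selected = None
--     abis = set()
--     for n in dir_list:
--         if n.startswith('lib/'):
--             abis.add(n.split('/')[1])
--     for abi_dir in ABI_DIRS:
--         abi = abi_dir.split('/')[1]
--         if abi in abis: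
--             selected = abi_dir
--             break
--     return selected
-- ===== SOURCE B (Python) =====
-- ABI_DIRS = ['lib/armeabi-v7a/', 'lib/arm64-v8a/', 'lib/x86/', 'lib/x86_64/', 'lib/armeabi/', 'lib/mips/', 'lib/mips64/']
--
-- def select_abi_dir(dir_list):
--     # Single pass over dir_list tracking the best (lowest) priority index into
--     # ABI_DIRS; A instead builds a set of ABIs and then scans ABI_DIRS for a hit.
--     best = len(ABI_DIRS)
--     for n in dir_list:
--         if n.startswith('lib/'):
--             d = 'lib/' + n.split('/')[1] + '/'
--             if d in ABI_DIRS: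
--                 best = min(best, ABI_DIRS.index(d))
--     return ABI_DIRS[best] if best < len(ABI_DIRS) else None
-- ===== Notes on version B (the rewrite author's own statement) =====
-- stated objective: alternative
-- what changed: B makes a single pass over dir_list, reconstructing 'lib/<abi>/' for each entry and tracking the lowest matching priority index into ABI_DIRS, then returns ABI_DIRS[best]; A builds a set of ABIs first and then scans ABI_DIRS for the first member.
import Mathlib
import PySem

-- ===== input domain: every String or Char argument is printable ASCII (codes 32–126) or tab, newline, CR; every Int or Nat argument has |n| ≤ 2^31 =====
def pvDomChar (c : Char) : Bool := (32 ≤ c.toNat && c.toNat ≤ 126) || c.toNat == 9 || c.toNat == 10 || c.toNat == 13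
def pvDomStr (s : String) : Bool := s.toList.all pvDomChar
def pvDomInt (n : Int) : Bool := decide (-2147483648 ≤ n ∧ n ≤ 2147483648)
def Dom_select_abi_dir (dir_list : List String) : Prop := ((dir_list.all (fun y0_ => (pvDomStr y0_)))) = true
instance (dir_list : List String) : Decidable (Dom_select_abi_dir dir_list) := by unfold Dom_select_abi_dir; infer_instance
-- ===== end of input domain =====

-- B replaces A's build-a-set-then-scan-the-priority-list strategy by a single pass over
-- dir_list that tracks the lowest matching priority index into ABI_DIRS.

def ABI_DIRS : List String :=
  ["lib/armeabi-v7a/", "lib/arm64-v8a/", "lib/x86/", "lib/x86_64/", "lib/armeabi/", "lib/mips/", "lib/mips64/"]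

-- n.split('/')[1]; exact whenever n contains '/', which every use guarantees
-- (n passed the startswith 'lib/' guard, or n is one of the ABI_DIRS literals).
def part1 (n : String) : String := (PySem.List.pyGet? ((PySem.Str.split? n "/").getD []) 1).getD ""

-- ===== PORT A =====
def pickA (abis : PySem.Set String) : List String → Option String
  | [] => none
  | d :: ds => if PySem.Set.contains abis (part1 d) then some d else pickA abis ds

def select_abi_dir (dir_list : List String) : Option String :=
  pickA
    (dir_list.foldl
      (fun s n => if PySem.Str.startswith n "lib/" then PySem.Set.add s (part1 n) else s)
      PySem.Set.empty)
    ABI_DIRS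

-- ===== PORT B =====
-- the loop body: best = min(best, ABI_DIRS.index(d)) behind the two guards
def stepB (best : Int) (n : String) : Int :=
  if PySem.Str.startswith n "lib/" then
    let d := "lib/" ++ part1 n ++ "/"
    if ABI_DIRS.contains d then
      min best (((PySem.List.index? ABI_DIRS d).getD 0 : Nat) : Int)
    else best
  else best

def select_abi_dir_alt (dir_list : List String) : Option String :=
  let best := dir_list.foldl stepB ((ABI_DIRS.length : Nat) : Int)
  if best < ((ABI_DIRS.length : Nat) : Int) then PySem.List.pyGet? ABI_DIRS best else none

-- ===== PRECONDITION & SPEC =====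
def Spec_select_abi_dir (dir_list : List String) (out : Option String) : Prop := out = select_abi_dir_alt dir_list
instance (dir_list : List String) (out : Option String) : Decidable (Spec_select_abi_dir dir_list out) := by unfold Spec_select_abi_dir; infer_instance

-- ===== CLAIM (what is proved, stated in full; the proofs are below) =====
def Claim_equal_select_abi_dir : Prop := ∀ (dir_list : List String), Dom_select_abi_dir dir_list → Spec_select_abi_dir dir_list (select_abi_dir dir_list)

-- ===== LEMMAS AND PROOFS =====

-- the per-ABI match predicate computed from dir_list
def M (dir_list : List String) (a : String) : Bool :=
  dir_list.any (fun n => PySem.Str.startswith n "lib/" && part1 n == a)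

def abiNames : List String := ["armeabi-v7a", "arm64-v8a", "x86", "x86_64", "armeabi", "mips", "mips64"]
def fmiL (P : String → Bool) : List String → Int
  | [] => 0
  | a :: as => if P a then 0 else 1 + fmiL P as
def fmi (P : String → Bool) : Int := fmiL P abiNames
theorem fmiL_bounds (P : String → Bool) (l : List String) : 0 ≤ fmiL P l ∧ fmiL P l ≤ l.length := by
  induction l with
  | nil => simp [fmiL]
  | cons a as ih => simp only [fmiL, List.length_cons]; split_ifs <;> omega
theorem fmi_bounds (P : String → Bool) : 0 ≤ fmi P ∧ fmi P ≤ 7 := by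
  have := fmiL_bounds P abiNames; simpa [fmi, abiNames] using this
theorem fmi_false : fmi (fun _ => false) = 7 := by decide
theorem fmiL_or (P Q : String → Bool) (l : List String) :
    fmiL (fun a => P a || Q a) l = min (fmiL P l) (fmiL Q l) := by
  induction l with
  | nil => simp [fmiL]
  | cons a as ih =>
    have hp := fmiL_bounds P as
    have hq := fmiL_bounds Q as
    simp only [fmiL, ih]
    by_cases h1 : P a <;> by_cases h2 : Q a <;> simp [h1, h2] <;> omega
theorem fmi_or (P Q : String → Bool) :
    fmi (fun a => P a || Q a) = min (fmi P) (fmi Q) := fmiL_or P Q abiNames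
theorem p0 : part1 "lib/armeabi-v7a/" = "armeabi-v7a" := by decide
def rkB (n : String) : Int :=
  if PySem.Str.startswith n "lib/" then
    if ABI_DIRS.contains ("lib/" ++ part1 n ++ "/") then
      (((PySem.List.index? ABI_DIRS ("lib/" ++ part1 n ++ "/")).getD 0 : Nat) : Int)
    else 7
  else 7
theorem build_inj (b c : String) : ("lib/" ++ b ++ "/" = "lib/" ++ c ++ "/") ↔ b = c := by
  constructor
  · intro h
    have h' := congrArg String.toList h
    simp only [String.toList_append] at h'
    exact String.toList_inj.mp (List.append_cancel_left (List.append_cancel_right h'))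
  · intro h; rw [h]
theorem rkB_eq_fmi (n : String) :
    rkB n = fmi (fun a => PySem.Str.startswith n "lib/" && part1 n == a) := by
  by_cases hs : PySem.Str.startswith n "lib/"
  case neg =>
    have hs2 : PySem.Chars.startswith n.toList ['l', 'i', 'b', '/'] = false := by
      simpa [PySem.Str.startswith] using hs
    simp [rkB, fmi, fmiL, abiNames, hs2]
  case pos =>
  have hs2 : PySem.Chars.startswith n.toList ['l', 'i', 'b', '/'] = true := by
    simpa [PySem.Str.startswith] using hs
  by_cases h0 : part1 n = "armeabi-v7a"
  · simp [rkB, fmi, fmiL, abiNames, hs2, h0, ABI_DIRS]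
    try decide
  by_cases h1 : part1 n = "arm64-v8a"
  · simp [rkB, fmi, fmiL, abiNames, hs2, h0, h1, ABI_DIRS]
    try decide
  by_cases h2 : part1 n = "x86"
  · simp [rkB, fmi, fmiL, abiNames, hs2, h0, h1, h2, ABI_DIRS]
    try decide
  by_cases h3 : part1 n = "x86_64"
  · simp [rkB, fmi, fmiL, abiNames, hs2, h0, h1, h2, h3, ABI_DIRS]
    try decide
  by_cases h4 : part1 n = "armeabi"
  · simp [rkB, fmi, fmiL, abiNames, hs2, h0, h1, h2, h3, h4, ABI_DIRS]
    try decide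
  by_cases h5 : part1 n = "mips"
  · simp [rkB, fmi, fmiL, abiNames, hs2, h0, h1, h2, h3, h4, h5, ABI_DIRS]
    try decide
  by_cases h6 : part1 n = "mips64"
  · simp [rkB, fmi, fmiL, abiNames, hs2, h0, h1, h2, h3, h4, h5, h6, ABI_DIRS]
    try decide
  have e0 : ("lib/armeabi-v7a/" : String) = "lib/" ++ "armeabi-v7a" ++ "/" := rfl
  have e1 : ("lib/arm64-v8a/" : String) = "lib/" ++ "arm64-v8a" ++ "/" := rfl
  have e2 : ("lib/x86/" : String) = "lib/" ++ "x86" ++ "/" := rfl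
  have e3 : ("lib/x86_64/" : String) = "lib/" ++ "x86_64" ++ "/" := rfl
  have e4 : ("lib/armeabi/" : String) = "lib/" ++ "armeabi" ++ "/" := rfl
  have e5 : ("lib/mips/" : String) = "lib/" ++ "mips" ++ "/" := rfl
  have e6 : ("lib/mips64/" : String) = "lib/" ++ "mips64" ++ "/" := rfl
  have hc : ("lib/" ++ part1 n ++ "/") ∉ ABI_DIRS := by
    intro hmem
    simp only [ABI_DIRS, List.mem_cons, List.not_mem_nil, or_false] at hmem
    rcases hmem with h|h|h|h|h|h|h
    · rw [e0] at h; exact h0 ((build_inj _ _).mp h)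
    · rw [e1] at h; exact h1 ((build_inj _ _).mp h)
    · rw [e2] at h; exact h2 ((build_inj _ _).mp h)
    · rw [e3] at h; exact h3 ((build_inj _ _).mp h)
    · rw [e4] at h; exact h4 ((build_inj _ _).mp h)
    · rw [e5] at h; exact h5 ((build_inj _ _).mp h)
    · rw [e6] at h; exact h6 ((build_inj _ _).mp h)
  simp [rkB, fmi, fmiL, abiNames, hs2, hc, h0, h1, h2, h3, h4, h5, h6]

theorem contains_add (s : PySem.Set String) (x a : String) :
    PySem.Set.contains (PySem.Set.add s x) a = (PySem.Set.contains s a || x == a) := by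
  rw [Bool.eq_iff_iff]
  simp only [PySem.Set.contains_eq_listContains, List.contains_eq_mem, Bool.or_eq_true,
    decide_eq_true_eq, beq_iff_eq, PySem.Set.mem_add]
  tauto

theorem contains_foldl (l : List String) (s : PySem.Set String) (a : String) :
    PySem.Set.contains
      (l.foldl (fun s n => if PySem.Str.startswith n "lib/" then PySem.Set.add s (part1 n) else s) s) a
    = (PySem.Set.contains s a || M l a) := by
  induction l generalizing s with
  | nil => simp [M]
  | cons n ns ih =>
    simp only [List.foldl_cons, M, List.any_cons]
    by_cases h : PySem.Str.startswith n "lib/"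
    · rw [if_pos h, ih, contains_add, h]
      simp [M, Bool.or_assoc]
    · have h' : PySem.Str.startswith n "lib/" = false := by simpa using h
      rw [if_neg h, ih, h']
      simp [M]

theorem stepB_eq (b : Int) (n : String) (hb : b ≤ 7) : stepB b n = min b (rkB n) := by
  simp only [stepB, rkB]
  split_ifs <;> omega

theorem rkB_le (n : String) : rkB n ≤ 7 := by
  rw [rkB_eq_fmi]
  exact (fmi_bounds _).2

theorem stepB_le (b : Int) (n : String) (hb : b ≤ 7) : stepB b n ≤ 7 := by
  have := rkB_le n
  rw [stepB_eq b n hb]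
  omega

theorem foldl_min (l : List String) (b : Int) (hb : b ≤ 7) :
    l.foldl stepB b = min b (l.foldl stepB 7) := by
  induction l generalizing b with
  | nil => simp only [List.foldl_nil]; omega
  | cons n ns ih =>
    have hr := rkB_le n
    rw [List.foldl_cons, List.foldl_cons, ih (stepB b n) (stepB_le b n hb),
        ih (stepB 7 n) (stepB_le 7 n le_rfl),
        stepB_eq b n hb, stepB_eq 7 n le_rfl]
    omega

theorem foldl_eq_fmi (l : List String) : l.foldl stepB 7 = fmi (M l) := by
  induction l with
  | nil => simpa [M] using fmi_false.symm
  | cons n ns ih =>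
    have hM : M (n :: ns) = fun a => (PySem.Str.startswith n "lib/" && part1 n == a) || M ns a := by
      funext a; simp [M]
    rw [List.foldl_cons, foldl_min ns (stepB 7 n) (stepB_le 7 n le_rfl),
        ih, stepB_eq 7 n le_rfl, rkB_eq_fmi, hM, fmi_or]
    have hr := (fmi_bounds (fun a => PySem.Str.startswith n "lib/" && part1 n == a)).2
    omega

theorem A_eq_fmi (dl : List String) :
    select_abi_dir dl
      = if fmi (M dl) < 7 then PySem.List.pyGet? ABI_DIRS (fmi (M dl)) else none := by
  unfold select_abi_dir
  have p0 : part1 "lib/armeabi-v7a/" = "armeabi-v7a" := by decide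
  have p1 : part1 "lib/arm64-v8a/" = "arm64-v8a" := by decide
  have p2 : part1 "lib/x86/" = "x86" := by decide
  have p3 : part1 "lib/x86_64/" = "x86_64" := by decide
  have p4 : part1 "lib/armeabi/" = "armeabi" := by decide
  have p5 : part1 "lib/mips/" = "mips" := by decide
  have p6 : part1 "lib/mips64/" = "mips64" := by decide
  simp only [ABI_DIRS, pickA, p0, p1, p2, p3, p4, p5, p6]
  simp only [contains_foldl]
  simp only [PySem.Set.contains_eq_listContains, PySem.Set.empty, List.contains_nil, Bool.false_or]
  by_cases h0 : M dl "armeabi-v7a"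
  · simp [fmi, fmiL, abiNames, h0, PySem.List.pyGet?]
    try decide
  by_cases h1 : M dl "arm64-v8a"
  · simp [fmi, fmiL, abiNames, h0, h1, PySem.List.pyGet?]
    try decide
  by_cases h2 : M dl "x86"
  · simp [fmi, fmiL, abiNames, h0, h1, h2, PySem.List.pyGet?]
    try decide
  by_cases h3 : M dl "x86_64"
  · simp [fmi, fmiL, abiNames, h0, h1, h2, h3, PySem.List.pyGet?]
    try decide
  by_cases h4 : M dl "armeabi"
  · simp [fmi, fmiL, abiNames, h0, h1, h2, h3, h4, PySem.List.pyGet?]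
    try decide
  by_cases h5 : M dl "mips"
  · simp [fmi, fmiL, abiNames, h0, h1, h2, h3, h4, h5, PySem.List.pyGet?]
    try decide
  by_cases h6 : M dl "mips64"
  · simp [fmi, fmiL, abiNames, h0, h1, h2, h3, h4, h5, h6, PySem.List.pyGet?]
    try decide
  simp [fmi, fmiL, abiNames, h0, h1, h2, h3, h4, h5, h6]

-- ===== VERDICT (by name: the statement is the Claim_ definition above) =====
theorem select_abi_dir_spec : Claim_equal_select_abi_dir := by
  intro dl _
  unfold Spec_select_abi_dir select_abi_dir_alt
  have h7 : ((ABI_DIRS.length : Nat) : Int) = 7 := rfl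
  simp only [h7, foldl_eq_fmi]
  exact A_eq_fmi dl
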